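-- pv_equiv track=rewrite | github.com/thinnguyen625/Data-Mining-Lab01 | 19_B2.py | delete_no_area_set
-- ===== SOURCE A (Python) =====
-- def delete_no_area_set(data): #xóa tập bị thiếu diện tích
--     result = data
--     i=0
--     while i<len(result):
--         j = len(result[i])- 1
--         if result[i][j]!='':
--             i+=1
--             continue
--         else:
--             del result[i]
--     return result
-- ===== SOURCE B (Python) =====
-- def delete_no_area_set(data):
--     kept = [row for row in data if row[-1] != '']
--     data[:] = kept
--     return data
-- ===== Notes on version B (the rewrite author's own statement) =====
-- stated objective: simpler
-- what changed: Replaces A's while loop with index bookkeeping and in-place del by a single filtering comprehension written back with slice assignment, preserving in-place mutation and object identity.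
import Mathlib
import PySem

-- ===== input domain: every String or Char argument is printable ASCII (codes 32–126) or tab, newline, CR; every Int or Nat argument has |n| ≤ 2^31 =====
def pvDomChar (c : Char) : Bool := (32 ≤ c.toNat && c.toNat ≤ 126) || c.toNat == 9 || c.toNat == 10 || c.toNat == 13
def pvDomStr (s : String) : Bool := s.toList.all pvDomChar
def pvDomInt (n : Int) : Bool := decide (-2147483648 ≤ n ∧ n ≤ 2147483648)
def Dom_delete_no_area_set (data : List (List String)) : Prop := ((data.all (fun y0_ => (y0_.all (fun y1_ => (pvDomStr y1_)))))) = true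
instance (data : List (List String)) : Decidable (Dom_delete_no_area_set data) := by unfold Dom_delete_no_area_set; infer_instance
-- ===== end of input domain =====

-- B replaces A's index-bookkeeping while loop with in-place `del` by one filtering pass written back
-- with slice assignment; both mutate `data` in place and return the same list object — the
-- equivalence proved here is about the RETURN value (mid-raise partial mutation is outside Pre_).

-- ===== PORT A =====
-- while loop over index i with in-place deletion (del result[i] = List.eraseIdx)
def dnaLoopA (result : List (List String)) (i : Nat) : List (List String) :=
  if h : i < result.length then
    -- j = len(result[i]) - 1; result[i][j]
    match PySem.List.pyGet? result[i] ((result[i].length : Int) - 1) with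
    | some v => if v ≠ "" then dnaLoopA result (i + 1) else dnaLoopA (result.eraseIdx i) i
    | none => result   -- IndexError (empty row); excluded by Pre_
  else result
termination_by result.length - i
decreasing_by
  · omega
  · have : (result.eraseIdx i).length = result.length - 1 := by
      simp [List.length_eraseIdx, h]
    omega

def delete_no_area_set (data : List (List String)) : List (List String) :=
  dnaLoopA data 0

-- ===== PORT B =====
-- row[-1] != ''  (none = IndexError, excluded by Pre_)
def dnaKeep (row : List String) : Bool :=
  match PySem.List.pyGet? row (-1) with
  | some v => v ≠ ""
  | none => false

def delete_no_area_set_alt (data : List (List String)) : List (List String) :=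
  data.filter dnaKeep

-- ===== PRECONDITION & SPEC =====
-- Pre_ excludes inputs containing an empty row: there A (and B) raise IndexError.
def Pre_delete_no_area_set (data : List (List String)) : Prop :=
  ∀ row ∈ data, row ≠ []
instance (data : List (List String)) : Decidable (Pre_delete_no_area_set data) := by
  unfold Pre_delete_no_area_set; infer_instance

def pvWitness_delete_no_area_set : List (List String) :=
  [["a", "3"], ["b", ""], ["c", "7"]]

def Spec_delete_no_area_set (data : List (List String)) (out : List (List String)) : Prop := out = delete_no_area_set_alt data
instance (data : List (List String)) (out : List (List String)) : Decidable (Spec_delete_no_area_set data out) := by unfold Spec_delete_no_area_set; infer_instance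

-- ===== CLAIM (what is proved, stated in full; the proofs are below) =====
def Claim_equal_delete_no_area_set : Prop := ∀ (data : List (List String)), Dom_delete_no_area_set data → Pre_delete_no_area_set data → Spec_delete_no_area_set data (delete_no_area_set data)

-- ===== LEMMAS AND PROOFS =====

theorem dnaGet_last (row : List String) (h : row ≠ []) :
    PySem.List.pyGet? row ((row.length : Int) - 1) = row.getLast? := by
  have h1 : 1 ≤ row.length := List.length_pos_iff.mpr h
  have : ((row.length : Int) - 1) = ((row.length - 1 : Nat) : Int) := by omega
  rw [this, PySem.List.pyGet?_natCast, List.getLast?_eq_getElem?]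

theorem dnaLoopA_eq (result : List (List String)) (i : Nat)
    (h : ∀ row ∈ result, row ≠ []) :
    dnaLoopA result i = result.take i ++ (result.drop i).filter dnaKeep := by
  unfold dnaLoopA
  by_cases hi : i < result.length
  · simp only [hi, dite_true]
    have hrow : result[i] ≠ [] := h _ (List.getElem_mem hi)
    rw [dnaGet_last _ hrow]
    cases hl : result[i].getLast? with
    | none => exact absurd (List.getLast?_eq_none_iff.mp hl) hrow
    | some v =>
      dsimp only
      have hdrop : result.drop i = result[i] :: result.drop (i + 1) :=
        List.drop_eq_getElem_cons hi
      by_cases hv : v ≠ ""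
      · have hk : dnaKeep result[i] = true := by
          unfold dnaKeep; rw [PySem.List.pyGet?_neg_one, hl]; simp [hv]
        rw [if_pos hv, dnaLoopA_eq result (i + 1) h, hdrop, List.filter_cons]
        simp only [hk, if_true]
        rw [List.take_add_one, List.getElem?_eq_getElem hi]
        simp only [Option.toList_some, List.append_assoc, List.singleton_append]
      · have hk : dnaKeep result[i] = false := by
          unfold dnaKeep; rw [PySem.List.pyGet?_neg_one, hl]
          simp only [ne_eq, not_not] at hv
          simp [hv]
        have herase : result.eraseIdx i = result.take i ++ result.drop (i + 1) :=
          List.eraseIdx_eq_take_drop_succ result i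
        have hsub : ∀ row ∈ result.eraseIdx i, row ≠ [] := by
          intro row hm
          exact h _ ((List.eraseIdx_sublist result i).mem hm)
        have hlen : (result.take i).length = i := by
          simp [List.length_take, Nat.le_of_lt hi]
        rw [if_neg hv, dnaLoopA_eq (result.eraseIdx i) i hsub, herase,
          List.take_append_of_le_length (by omega),
          List.drop_append_of_le_length (by omega), hdrop, List.filter_cons]
        simp [hlen, hk]
  · simp only [hi, dite_false]
    have hle : result.length ≤ i := Nat.le_of_not_lt hi
    rw [List.take_of_length_le hle, List.drop_of_length_le hle]
    simp
termination_by result.length - i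
decreasing_by
  all_goals (
    have hlen' : (result.eraseIdx i).length = result.length - 1 := by
      simp [List.length_eraseIdx, hi]
    omega)

-- ===== VERDICT (by name: the statement is the Claim_ definition above) =====
theorem delete_no_area_set_spec : Claim_equal_delete_no_area_set := by
  intro data _ hpre
  unfold Spec_delete_no_area_set delete_no_area_set delete_no_area_set_alt
  rw [dnaLoopA_eq data 0 hpre]
  simp
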